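-- pv_equiv track=rewrite | github.com/mackelab/epiphyte | preprocessing/data_preprocessing/create_vectors_from_time_points.py | get_start_stop_times_from_label
-- ===== SOURCE A (Python) =====
-- def get_start_stop_times_from_label(neural_rec_time, patient_aligned_label):
--     """
--     This function extracts the start and stop times from a label.
--     'patient_aligned_label' has to have the same length as 'neural_rec_time'
--     The time points in the resulting vectors are in neural recording time
--
--     :param neural_rec_time: array
--         neural recording time
--     :param patient_aligned_label: array
--         label aligned to patient time
--
--     :return values, start_times, stop_times: arrays
--     """
--     tmp = patient_aligned_label[0]
--     values = [tmp]
--     start_times = [neural_rec_time[0]]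
--     stop_times = []
--     for i in range(1, len(patient_aligned_label)):
--         if not patient_aligned_label[i] == tmp:
--             values.append(patient_aligned_label[i])
--             start_times.append(neural_rec_time[i])
--             stop_times.append(neural_rec_time[i - 1])
--             tmp = patient_aligned_label[i]
--     stop_times.append(neural_rec_time[-1])
--
--     return values, start_times, stop_times
-- ===== SOURCE B (Python) =====
-- def get_start_stop_times_from_label(neural_rec_time, patient_aligned_label):
--     boundaries = [0] + [i for i in range(1, len(patient_aligned_label))
--                         if not patient_aligned_label[i] == patient_aligned_label[i - 1]]
--     values = [patient_aligned_label[b] for b in boundaries]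
--     start_times = [neural_rec_time[b] for b in boundaries]
--     stop_times = [neural_rec_time[b - 1] for b in boundaries[1:]]
--     stop_times.append(neural_rec_time[-1])
--     return values, start_times, stop_times
-- ===== Notes on version B (the rewrite author's own statement) =====
-- stated objective: alternative
-- what changed: Replaces A's single interleaved loop carrying four accumulators (tmp, values, start_times, stop_times) by first computing the list of run-start indices and then deriving each of the three output lists by a separate mapping pass.
import Mathlib
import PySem

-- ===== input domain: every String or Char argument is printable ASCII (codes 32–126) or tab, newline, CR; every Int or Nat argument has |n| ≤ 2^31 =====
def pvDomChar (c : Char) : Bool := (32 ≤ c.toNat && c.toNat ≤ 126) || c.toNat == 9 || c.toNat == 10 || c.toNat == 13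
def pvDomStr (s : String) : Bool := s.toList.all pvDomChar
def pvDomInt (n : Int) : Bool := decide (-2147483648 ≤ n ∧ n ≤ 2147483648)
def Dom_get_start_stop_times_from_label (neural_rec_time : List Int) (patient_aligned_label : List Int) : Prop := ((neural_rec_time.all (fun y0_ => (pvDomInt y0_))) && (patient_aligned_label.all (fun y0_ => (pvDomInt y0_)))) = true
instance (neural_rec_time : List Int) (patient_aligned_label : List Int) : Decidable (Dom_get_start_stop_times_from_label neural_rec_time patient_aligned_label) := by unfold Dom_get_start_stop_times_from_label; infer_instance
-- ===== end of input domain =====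

-- B replaces A's single interleaved four-accumulator loop by an index table of run starts
-- followed by three separate mapping passes (objective: alternative decomposition, same cost).

-- ===== PORT A =====
def get_start_stop_times_from_label (neural_rec_time : List Int) (patient_aligned_label : List Int) : List Int × List Int × List Int :=
  let tmp0 := PySem.List.pyGetD patient_aligned_label 0 0
  let s := (PySem.List.pyRange 1 (patient_aligned_label.length : Int) 1).foldl
    (fun (s : Int × List Int × List Int × List Int) i =>
      if !(PySem.List.pyGetD patient_aligned_label i 0 == s.1) then
        (PySem.List.pyGetD patient_aligned_label i 0,
         s.2.1 ++ [PySem.List.pyGetD patient_aligned_label i 0],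
         s.2.2.1 ++ [PySem.List.pyGetD neural_rec_time i 0],
         s.2.2.2 ++ [PySem.List.pyGetD neural_rec_time (i - 1) 0])
      else s)
    (tmp0, [tmp0], [PySem.List.pyGetD neural_rec_time 0 0], [])
  (s.2.1, s.2.2.1, s.2.2.2 ++ [PySem.List.pyGetD neural_rec_time (-1) 0])

-- ===== PORT B =====
def get_start_stop_times_from_label_alt (neural_rec_time : List Int) (patient_aligned_label : List Int) : List Int × List Int × List Int :=
  let boundaries : List Int :=
    0 :: (PySem.List.pyRange 1 (patient_aligned_label.length : Int) 1).filter
      (fun i => !(PySem.List.pyGetD patient_aligned_label i 0 == PySem.List.pyGetD patient_aligned_label (i - 1) 0))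
  let values := boundaries.map (fun b => PySem.List.pyGetD patient_aligned_label b 0)
  let start_times := boundaries.map (fun b => PySem.List.pyGetD neural_rec_time b 0)
  let stop_times := (PySem.List.slice boundaries (some 1) none).map (fun b => PySem.List.pyGetD neural_rec_time (b - 1) 0)
  (values, start_times, stop_times ++ [PySem.List.pyGetD neural_rec_time (-1) 0])

-- ===== PRECONDITION & SPEC =====
-- Pre_ excludes exactly the IndexError inputs of Python A (and B): an empty label or time
-- array, or a run boundary at an index not covered by neural_rec_time.
def Pre_get_start_stop_times_from_label (neural_rec_time : List Int) (patient_aligned_label : List Int) : Prop :=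
  patient_aligned_label ≠ [] ∧ neural_rec_time ≠ [] ∧
  ∀ i : Nat, i < patient_aligned_label.length → 0 < i →
    patient_aligned_label.getD i 0 ≠ patient_aligned_label.getD (i - 1) 0 →
    i < neural_rec_time.length
instance (neural_rec_time : List Int) (patient_aligned_label : List Int) : Decidable (Pre_get_start_stop_times_from_label neural_rec_time patient_aligned_label) := by unfold Pre_get_start_stop_times_from_label; infer_instance
def pvWitness_get_start_stop_times_from_label : List Int × List Int := ([10, 20, 30], [1, 1, 2])

def Spec_get_start_stop_times_from_label (neural_rec_time : List Int) (patient_aligned_label : List Int) (out : List Int × List Int × List Int) : Prop := out = get_start_stop_times_from_label_alt neural_rec_time patient_aligned_label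
instance (neural_rec_time : List Int) (patient_aligned_label : List Int) (out : List Int × List Int × List Int) : Decidable (Spec_get_start_stop_times_from_label neural_rec_time patient_aligned_label out) := by unfold Spec_get_start_stop_times_from_label; infer_instance

-- ===== CLAIM (what is proved, stated in full; the proofs are below) =====
def Claim_equal_get_start_stop_times_from_label : Prop := ∀ (neural_rec_time : List Int) (patient_aligned_label : List Int), Dom_get_start_stop_times_from_label neural_rec_time patient_aligned_label → Pre_get_start_stop_times_from_label neural_rec_time patient_aligned_label → Spec_get_start_stop_times_from_label neural_rec_time patient_aligned_label (get_start_stop_times_from_label neural_rec_time patient_aligned_label)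

-- ===== LEMMAS AND PROOFS =====

-- Loop invariant for A's fold over range(1, n): the carried tmp is label[n-1], and the three
-- accumulators are exactly B's maps over the boundary table restricted to range(1, n).
lemma A_loop_inv (neural_rec_time patient_aligned_label : List Int) (n : Nat) (hn : 1 ≤ n) :
    (PySem.List.pyRange 1 (n : Int) 1).foldl
      (fun (s : Int × List Int × List Int × List Int) i =>
        if !(PySem.List.pyGetD patient_aligned_label i 0 == s.1) then
          (PySem.List.pyGetD patient_aligned_label i 0,
           s.2.1 ++ [PySem.List.pyGetD patient_aligned_label i 0],
           s.2.2.1 ++ [PySem.List.pyGetD neural_rec_time i 0],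
           s.2.2.2 ++ [PySem.List.pyGetD neural_rec_time (i - 1) 0])
        else s)
      (PySem.List.pyGetD patient_aligned_label 0 0,
       [PySem.List.pyGetD patient_aligned_label 0 0],
       [PySem.List.pyGetD neural_rec_time 0 0], []) =
    (PySem.List.pyGetD patient_aligned_label ((n : Int) - 1) 0,
     (0 :: (PySem.List.pyRange 1 (n : Int) 1).filter
        (fun i => !(PySem.List.pyGetD patient_aligned_label i 0 == PySem.List.pyGetD patient_aligned_label (i - 1) 0))).map
       (fun b => PySem.List.pyGetD patient_aligned_label b 0),
     (0 :: (PySem.List.pyRange 1 (n : Int) 1).filter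
        (fun i => !(PySem.List.pyGetD patient_aligned_label i 0 == PySem.List.pyGetD patient_aligned_label (i - 1) 0))).map
       (fun b => PySem.List.pyGetD neural_rec_time b 0),
     ((PySem.List.pyRange 1 (n : Int) 1).filter
        (fun i => !(PySem.List.pyGetD patient_aligned_label i 0 == PySem.List.pyGetD patient_aligned_label (i - 1) 0))).map
       (fun b => PySem.List.pyGetD neural_rec_time (b - 1) 0)) := by
  induction n, hn using Nat.le_induction with
  | base =>
      simp [PySem.List.pyRange_one_eq_nil]
  | succ n hn ih =>
      have hcast : ((n + 1 : Nat) : Int) = (n : Int) + 1 := by push_cast; ring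
      rw [hcast, PySem.List.pyRange_one_succ_right (by exact_mod_cast hn : (1 : Int) ≤ (n : Int)),
        List.foldl_append, List.filter_append, ih]
      simp only [List.foldl_cons, List.foldl_nil, List.filter_cons, List.filter_nil]
      by_cases hb : patient_aligned_label[n]?.getD 0 =
          PySem.List.pyGetD patient_aligned_label ((n : Int) - 1) 0
      · simp [hb]
      · simp [hb]

-- ===== VERDICT (by name: the statement is the Claim_ definition above) =====
theorem get_start_stop_times_from_label_spec : Claim_equal_get_start_stop_times_from_label := by
  intro nrt label _ _
  unfold Spec_get_start_stop_times_from_label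
  simp only [get_start_stop_times_from_label, get_start_stop_times_from_label_alt]
  rcases Nat.eq_zero_or_pos label.length with h0 | hpos
  · have hnil : PySem.List.pyRange 1 ((label.length : Int)) 1 = [] := by
      rw [h0]; exact PySem.List.pyRange_one_eq_nil (by norm_num)
    simp [hnil, PySem.List.slice_from_one]
  · rw [A_loop_inv nrt label label.length hpos]
    simp [PySem.List.slice_from_one]
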